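-- pv_equiv track=rewrite | github.com/ShadmanSakibShuvo/_Academics_ | CSE 221 (Algorithm)/Lab/Lab 4/Task 6.py | dfs
-- ===== SOURCE A (Python) =====
-- def validMove(grid,visited,i,j):
--     return 0<=i< len(grid) and 0<=j<len(grid[0]) and grid[i][j]!='#' and not visited[i][j]
--
-- def dfs(grid, visited, i, j):
--     if not validMove(grid,visited,i,j):
--         return 0
--     visited[i][j] = True
--     diamonds=0
--     if grid[i][j]=='D':
--         diamonds=1
--     moves=[(0,1),(0,-1),(1,0),(-1,0)]
--     for move in moves:
--         ni,nj =i+move[0],j+move[1]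
--         diamonds+=dfs(grid,visited,ni,nj)
--     return diamonds
-- ===== SOURCE B (Python) =====
-- def validMove(grid,visited,i,j):
--     return 0<=i< len(grid) and 0<=j<len(grid[0]) and grid[i][j]!='#' and not visited[i][j]
--
-- def dfs(grid, visited, i, j):
--     stack = [(i, j)]
--     diamonds = 0
--     while stack:
--         x, y = stack.pop()
--         if not validMove(grid, visited, x, y):
--             continue
--         visited[x][y] = True
--         if grid[x][y] == 'D':
--             diamonds += 1
--         stack.extend(((x - 1, y), (x + 1, y), (x, y - 1), (x, y + 1)))
--     return diamonds
-- ===== Notes on version B (the rewrite author's own statement) =====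
-- stated objective: alternative
-- what changed: Replaced A's tree-shaped recursion (one recursive call per neighbour, summed across calls) by a single iterative loop over an explicit stack that pops a cell, validates it, marks it, counts a diamond and pushes its four neighbours.
-- outside the precondition, e.g. on dfs([['D', '#'], ['#']], [[False, False], [False]], 0, 0): A returns 1, B returns 1
import Mathlib
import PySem

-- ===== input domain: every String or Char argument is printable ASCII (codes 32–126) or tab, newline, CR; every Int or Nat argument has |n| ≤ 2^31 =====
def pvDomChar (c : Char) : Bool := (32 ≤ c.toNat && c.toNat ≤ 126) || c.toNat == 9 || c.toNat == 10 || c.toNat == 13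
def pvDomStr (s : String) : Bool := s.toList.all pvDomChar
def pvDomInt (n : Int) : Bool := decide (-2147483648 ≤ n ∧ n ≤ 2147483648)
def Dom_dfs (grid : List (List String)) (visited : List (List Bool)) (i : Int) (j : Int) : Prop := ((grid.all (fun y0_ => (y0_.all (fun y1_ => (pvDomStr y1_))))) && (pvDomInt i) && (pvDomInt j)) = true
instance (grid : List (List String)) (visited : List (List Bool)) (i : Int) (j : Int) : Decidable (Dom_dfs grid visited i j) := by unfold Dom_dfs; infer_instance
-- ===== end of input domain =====

-- B replaces A's tree-shaped recursion by one iterative loop over an explicit stack (same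
-- traversal order); both Pythons mutate `visited` in place identically — the theorems here are
-- about the RETURN value (the ports thread the visited matrix as state).

-- ===== PORT A =====

-- grid[i][j] (only read under the 0 ≤ i < len(grid), 0 ≤ j < len(grid[0]) guards; defaults unreachable there)
def cellAt (grid : List (List String)) (i j : Int) : String :=
  (PySem.List.pyGet? ((PySem.List.pyGet? grid i).getD []) j).getD "#"

-- visited[i][j]; the default `true` makes an out-of-range read count as visited (never reached inside Pre_)
def visitedAt (visited : List (List Bool)) (i j : Int) : Bool :=
  (PySem.List.pyGet? ((PySem.List.pyGet? visited i).getD []) j).getD true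

-- the shared helper validMove, used verbatim by both Python versions
def validMove (grid : List (List String)) (visited : List (List Bool)) (i j : Int) : Bool :=
  (decide (0 ≤ i) && decide (i < (grid.length : Int))) &&
  (decide (0 ≤ j) && decide (j < ((grid.headD []).length : Int))) &&
  (cellAt grid i j != "#") &&
  (! visitedAt visited i j)

-- visited[i][j] = True (in-place mutation, threaded as state)
def mark (visited : List (List Bool)) (i j : Int) : List (List Bool) :=
  visited.modify i.toNat (fun row => row.modify j.toNat (fun _ => true))

-- number of unvisited cells: sizes the fuel of A's recursion (each valid call marks one)
def countFalse (v : List (List Bool)) : Nat := (v.map (fun r => r.count false)).sum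

-- A's recursive dfs, fuel-guarded to be total; returns (diamonds, visited')
def dfsAux (grid : List (List String)) : Nat → List (List Bool) → Int → Int → Int × List (List Bool)
  | 0, visited, _, _ => (0, visited)
  | fuel + 1, visited, i, j =>
    if validMove grid visited i j then
      let visited1 := mark visited i j
      let d0 : Int := if cellAt grid i j = "D" then 1 else 0
      ([((0 : Int), (1 : Int)), (0, -1), (1, 0), (-1, 0)]).foldl
        (fun acc mv =>
          let r := dfsAux grid fuel acc.2 (i + mv.1) (j + mv.2)
          (acc.1 + r.1, r.2)) (d0, visited1)
    else (0, visited)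

def dfs (grid : List (List String)) (visited : List (List Bool)) (i : Int) (j : Int) : Int :=
  (dfsAux grid (countFalse visited + 1) visited i j).1

-- ===== PORT B =====

-- termination of B's loop: a valid pop flips one False to True
theorem count_modify_row (r : List Bool) (n : Nat) (h : r[n]? = some false) :
    (r.modify n (fun _ => true)).count false + 1 = r.count false := by
  induction r generalizing n with
  | nil => simp at h
  | cons a t ih =>
    cases n with
    | zero => simp at h; simp [h]
    | succ m =>
      simp at h
      have := ih m h
      simp [List.count_cons]
      omega

theorem validMove_facts (grid : List (List String)) (v : List (List Bool)) (i j : Int)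
    (h : validMove grid v i j = true) : 0 ≤ i ∧ 0 ≤ j ∧ visitedAt v i j = false := by
  simp [validMove] at h
  tauto

theorem countFalse_modify_lt (v : List (List Bool)) (m : Nat) (row : List Bool)
    (hrow : v[m]? = some row) (f : List Bool → List Bool)
    (hf : (f row).count false < row.count false) :
    countFalse (v.modify m f) < countFalse v := by
  induction v generalizing m with
  | nil => simp at hrow
  | cons r0 t ih =>
    cases m with
    | zero =>
      simp at hrow; subst hrow
      simp [countFalse, List.modify_zero_cons]
      omega
    | succ k =>
      simp at hrow
      have := ih k hrow
      simp only [countFalse, List.modify_succ_cons, List.map_cons, List.sum_cons] at *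
      omega

theorem countFalse_mark_lt (v : List (List Bool)) (i j : Int)
    (hi : 0 ≤ i) (hj : 0 ≤ j) (h : visitedAt v i j = false) :
    countFalse (mark v i j) < countFalse v := by
  unfold visitedAt at h
  rw [PySem.List.pyGet?_of_nonneg _ hi] at h
  cases hrow : v[i.toNat]? with
  | none => rw [hrow] at h; simp [PySem.List.pyGet?] at h
  | some row =>
    rw [hrow] at h
    simp only [Option.getD_some] at h
    rw [PySem.List.pyGet?_of_nonneg _ hj] at h
    cases hc : row[j.toNat]? with
    | none => rw [hc] at h; simp at h
    | some b =>
      rw [hc] at h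
      simp only [Option.getD_some] at h
      subst h
      have hcnt := count_modify_row row j.toNat hc
      exact countFalse_modify_lt v i.toNat row hrow _ (by omega)

-- B's stack loop: head of the list = top of the Python stack
def dfsLoop (grid : List (List String)) (visited : List (List Bool))
    (stack : List (Int × Int)) (acc : Int) : Int :=
  match stack with
  | [] => acc
  | (x, y) :: rest =>
    if h : validMove grid visited x y then
      dfsLoop grid (mark visited x y)
        ((x, y + 1) :: (x, y - 1) :: (x + 1, y) :: (x - 1, y) :: rest)
        (acc + (if cellAt grid x y = "D" then 1 else 0))
    else
      dfsLoop grid visited rest acc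
termination_by (5 * countFalse visited + stack.length)
decreasing_by
  · obtain ⟨hi, hj, hv⟩ := validMove_facts grid visited x y h
    have := countFalse_mark_lt visited x y hi hj hv
    simp only [List.length_cons]
    omega
  · simp only [List.length_cons]; omega

def dfs_alt (grid : List (List String)) (visited : List (List Bool)) (i : Int) (j : Int) : Int :=
  dfsLoop grid visited [(i, j)] 0

-- ===== PRECONDITION & SPEC =====
-- Pre_ excludes only the shape-mismatched inputs (a grid row or visited row shorter than grid's
-- first row, or visited shorter than grid) whose start cell IS expandable, on which Python's
-- grid[x][y] / visited[x][y] can raise IndexError during the search; mismatched inputs whose start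
-- is out of bounds or blocked (A returns 0 before touching the short rows) stay inside, and where
-- the DFS happens not to reach the short part of an excluded input A still returns and agrees with B.
def Pre_dfs (grid : List (List String)) (visited : List (List Bool)) (i : Int) (j : Int) : Prop :=
  (grid.all (fun r => (grid.headD []).length ≤ r.length)
    ∧ grid.length ≤ visited.length
    ∧ (visited.take grid.length).all (fun r => (grid.headD []).length ≤ r.length))
  ∨ ¬(0 ≤ i ∧ i < (grid.length : Int))
  ∨ ¬(0 ≤ j ∧ j < ((grid.headD []).length : Int))
  ∨ (j.toNat < (grid.getD i.toNat []).length
      ∧ i.toNat < visited.length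
      ∧ j.toNat < (visited.getD i.toNat []).length
      ∧ ((grid.getD i.toNat []).getD j.toNat "" = "#"
          ∨ (visited.getD i.toNat []).getD j.toNat false = true))
instance (grid : List (List String)) (visited : List (List Bool)) (i : Int) (j : Int) : Decidable (Pre_dfs grid visited i j) := by unfold Pre_dfs; infer_instance

def pvWitness_dfs : List (List String) × List (List Bool) × Int × Int :=
  ([["D", "."], ["#", "D"]], [[false, false], [false, false]], 0, 0)

def Spec_dfs (grid : List (List String)) (visited : List (List Bool)) (i : Int) (j : Int) (out : Int) : Prop := out = dfs_alt grid visited i j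
instance (grid : List (List String)) (visited : List (List Bool)) (i : Int) (j : Int) (out : Int) : Decidable (Spec_dfs grid visited i j out) := by unfold Spec_dfs; infer_instance

-- ===== CLAIM (what is proved, stated in full; the proofs are below) =====
def Claim_equal_dfs : Prop := ∀ (grid : List (List String)) (visited : List (List Bool)) (i : Int) (j : Int), Dom_dfs grid visited i j → Pre_dfs grid visited i j → Spec_dfs grid visited i j (dfs grid visited i j)

-- ===== LEMMAS AND PROOFS =====

-- A's recursion never unmarks a cell
theorem cF_dfsAux_le (grid : List (List String)) :
    ∀ fuel (v : List (List Bool)) (i j : Int),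
      countFalse (dfsAux grid fuel v i j).2 ≤ countFalse v := by
  intro fuel
  induction fuel with
  | zero => intro v i j; simp [dfsAux]
  | succ f ih =>
    intro v i j
    rw [dfsAux]
    split
    · next h =>
      simp only [List.foldl]
      obtain ⟨hi, hj, hv⟩ := validMove_facts grid v i j h
      have h0 := countFalse_mark_lt v i j hi hj hv
      have h1 := ih (mark v i j) (i + 0) (j + 1)
      have h2 := ih (dfsAux grid f (mark v i j) (i + 0) (j + 1)).2 (i + 0) (j + -1)
      have h3 := ih (dfsAux grid f (dfsAux grid f (mark v i j) (i + 0) (j + 1)).2 (i + 0) (j + -1)).2 (i + 1) (j + 0)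
      have h4 := ih (dfsAux grid f (dfsAux grid f (dfsAux grid f (mark v i j) (i + 0) (j + 1)).2 (i + 0) (j + -1)).2 (i + 1) (j + 0)).2 (i + -1) (j + 0)
      omega
    · simp

-- one step of B's loop computes one recursive call of A and pushes its pending siblings
theorem sim (grid : List (List String)) :
    ∀ fuel (v : List (List Bool)) (i j : Int) (rest : List (Int × Int)) (acc : Int),
      countFalse v < fuel →
      dfsLoop grid v ((i, j) :: rest) acc
        = dfsLoop grid (dfsAux grid fuel v i j).2 rest (acc + (dfsAux grid fuel v i j).1) := by
  intro fuel
  induction fuel with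
  | zero => intro v i j rest acc h; omega
  | succ f ih =>
    intro v i j rest acc hf
    rw [dfsLoop, dfsAux]
    split
    · next h =>
      obtain ⟨hi, hj, hv⟩ := validMove_facts grid v i j h
      have h0 := countFalse_mark_lt v i j hi hj hv
      simp only [List.foldl]
      set v1 := mark v i j with hv1
      set d0 : Int := if cellAt grid i j = "D" then 1 else 0 with hd0
      have e1 : (i, j + 1) = (i + 0, j + 1) := by norm_num
      have e2 : (i, j - 1) = (i + 0, j + -1) := by ring_nf
      have e3 : (i + 1, j) = (i + 1, j + 0) := by norm_num
      have e4 : (i - 1, j) = (i + -1, j + 0) := by ring_nf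
      rw [e1, e2, e3, e4]
      rw [ih v1 (i + 0) (j + 1) _ _ (by omega)]
      set p1 := dfsAux grid f v1 (i + 0) (j + 1) with hp1
      have c1 : countFalse p1.2 < f := lt_of_le_of_lt (cF_dfsAux_le grid f v1 _ _) (by omega)
      rw [ih p1.2 (i + 0) (j + -1) _ _ c1]
      set p2 := dfsAux grid f p1.2 (i + 0) (j + -1) with hp2
      have c2 : countFalse p2.2 < f := lt_of_le_of_lt (cF_dfsAux_le grid f p1.2 _ _) c1
      rw [ih p2.2 (i + 1) (j + 0) _ _ c2]
      set p3 := dfsAux grid f p2.2 (i + 1) (j + 0) with hp3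
      have c3 : countFalse p3.2 < f := lt_of_le_of_lt (cF_dfsAux_le grid f p2.2 _ _) c2
      rw [ih p3.2 (i + -1) (j + 0) _ _ c3]
      congr 1
      ring
    · next h =>
      simp only [add_zero]

-- ===== VERDICT (by name: the statement is the Claim_ definition above) =====
theorem dfs_spec : Claim_equal_dfs := by
  intro grid visited i j _ _
  unfold Spec_dfs dfs dfs_alt
  rw [sim grid (countFalse visited + 1) visited i j [] 0 (by omega)]
  rw [dfsLoop]
  omega
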